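-- pv_equiv track=rewrite | github.com/bristena-op/AnoniMME | src/servers/master/scripts/verify_wr.py | verify_wr
-- ===== SOURCE A (Python) =====
-- from collections import Counter
--
-- def verify_wr(write_requests):
--     check_vector = [0] * len(write_requests[0])
--
--     for wr in write_requests:
--         check_vector += wr
--
--     if Counter(check_vector).most_common(1)[0][1] == len(check_vector) - 1:
--         return 1
--     else:
--         return 0
-- ===== SOURCE B (Python) =====
-- from itertools import groupby
--
-- def verify_wr(write_requests):
--     combined = [0] * len(write_requests[0])
--     for wr in write_requests:
--         combined.extend(wr)
--     run_lengths = sorted((sum(1 for _ in g) for _, g in groupby(sorted(combined))),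
--                          reverse=True)
--     return 1 if run_lengths[0] == len(combined) - 1 else 0
-- ===== Notes on version B (the rewrite author's own statement) =====
-- stated objective: alternative
-- what changed: Replaces Counter.most_common with sort-then-groupby: the combined vector is sorted, run lengths of equal-value runs are collected, and the largest run length (head of a descending sort) is compared to len-1.
import Mathlib
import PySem

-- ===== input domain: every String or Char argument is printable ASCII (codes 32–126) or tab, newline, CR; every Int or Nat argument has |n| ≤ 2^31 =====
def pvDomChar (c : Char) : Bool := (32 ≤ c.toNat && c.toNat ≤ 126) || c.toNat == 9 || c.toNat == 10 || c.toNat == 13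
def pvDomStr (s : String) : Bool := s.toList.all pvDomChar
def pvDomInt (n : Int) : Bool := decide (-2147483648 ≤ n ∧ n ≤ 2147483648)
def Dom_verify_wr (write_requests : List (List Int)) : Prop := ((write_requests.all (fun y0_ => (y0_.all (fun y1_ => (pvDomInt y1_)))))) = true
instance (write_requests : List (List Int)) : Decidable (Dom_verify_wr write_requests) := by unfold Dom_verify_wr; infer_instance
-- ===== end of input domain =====

-- B replaces Counter.most_common with sort + run-length scan: an alternative decomposition, not faster.

-- ===== PORT A =====
-- A: check_vector = [0]*len(write_requests[0]); extend by each wr; Counter(...).most_common(1)[0][1] == len-1 ? 1 : 0.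
-- write_requests[0] on [] raises IndexError and most_common(1)[0] on an empty vector raises IndexError: both excluded by Pre_.
def verify_wr (write_requests : List (List Int)) : Int :=
  let check0 : List Int :=
    List.replicate ((PySem.List.pyGet? write_requests 0).getD []).length 0
  let check_vector := write_requests.foldl (fun cv wr => cv ++ wr) check0
  -- Counter(check_vector).most_common(1): items sorted by count, descending
  let mc := PySem.List.sorted (PySem.Dict.counter check_vector).items (fun p => p.2) true
  match PySem.List.pyGet? mc 0 with
  | none => 0         -- Python raises IndexError here (outside Pre_)
  | some p => if p.2 = (check_vector.length : Int) - 1 then 1 else 0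

-- ===== PORT B =====
-- run lengths of equal-value runs (itertools.groupby group sizes), hand-ported step for step
def runLengthsGo (cur : Int) (n : Int) : List Int → List Int
  | [] => [n]
  | y :: ys => if y = cur then runLengthsGo cur (n + 1) ys else n :: runLengthsGo y 1 ys

def runLengths : List Int → List Int
  | [] => []
  | x :: xs => runLengthsGo x 1 xs

def verify_wr_alt (write_requests : List (List Int)) : Int :=
  let combined : List Int :=
    List.replicate ((PySem.List.pyGet? write_requests 0).getD []).length 0
  let combined := write_requests.foldl (fun cv wr => cv ++ wr) combined
  let run_lengths :=
    PySem.List.sorted (runLengths (PySem.List.sorted combined (fun x => x) false)) (fun x => x) true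
  match PySem.List.pyGet? run_lengths 0 with
  | none => 0         -- Python raises IndexError here (outside Pre_)
  | some m => if m = (combined.length : Int) - 1 then 1 else 0

-- ===== PRECONDITION & SPEC =====
-- Pre_ excludes exactly the inputs where A raises IndexError: an empty request list
-- (write_requests[0]) and an all-empty one (most_common(1)[0] on an empty vector).
def Pre_verify_wr (write_requests : List (List Int)) : Prop :=
  write_requests ≠ [] ∧ write_requests.any (fun l => !l.isEmpty) = true
instance (write_requests : List (List Int)) : Decidable (Pre_verify_wr write_requests) := by
  unfold Pre_verify_wr; infer_instance
def pvWitness_verify_wr : List (List Int) := [[1], [1]]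

def Spec_verify_wr (write_requests : List (List Int)) (out : Int) : Prop := out = verify_wr_alt write_requests
instance (write_requests : List (List Int)) (out : Int) : Decidable (Spec_verify_wr write_requests out) := by unfold Spec_verify_wr; infer_instance

-- ===== CLAIM (what is proved, stated in full; the proofs are below) =====
def Claim_equal_verify_wr : Prop := ∀ (write_requests : List (List Int)), Dom_verify_wr write_requests → Pre_verify_wr write_requests → Spec_verify_wr write_requests (verify_wr write_requests)

-- ===== LEMMAS AND PROOFS =====

-- the three facts about the run-length loop on a sorted tail, in one induction
lemma runLengthsGo_spec : ∀ (xs : List Int) (cur n : Int),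
    xs.Pairwise (· ≤ ·) → (∀ y ∈ xs, cur ≤ y) →
    ((∀ m ∈ runLengthsGo cur n xs,
        m = n + (xs.count cur : Int) ∨ ∃ v ∈ xs, cur < v ∧ m = (xs.count v : Int))
      ∧ (n + (xs.count cur : Int)) ∈ runLengthsGo cur n xs
      ∧ (∀ v ∈ xs, cur < v → ((xs.count v : Int)) ∈ runLengthsGo cur n xs)) := by
  intro xs
  induction xs with
  | nil =>
    intro cur n _ _
    refine ⟨?_, ?_, ?_⟩ <;> simp [runLengthsGo]
  | cons y ys ih =>
    intro cur n hpw hle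
    have hpw' : ys.Pairwise (· ≤ ·) := hpw.of_cons
    have hyle : ∀ z ∈ ys, y ≤ z := fun z hz => List.rel_of_pairwise_cons hpw hz
    by_cases hy : y = cur
    · subst hy
      have ihh := ih y (n + 1) hpw' hyle
      have hcnt : ((y :: ys).count y : Int) = (ys.count y : Int) + 1 := by
        simp [List.count_cons_self]
      refine ⟨?_, ?_, ?_⟩
      · intro m hm
        simp only [runLengthsGo] at hm
        rcases ihh.1 m hm with h | ⟨v, hv, hlt, he⟩
        · left; rw [hcnt]; omega
        · right
          refine ⟨v, List.mem_cons_of_mem _ hv, hlt, ?_⟩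
          have hyv : ¬ (y = v) := by omega
          simp [hyv, he]
      · simp only [runLengthsGo]
        rw [hcnt]
        have := ihh.2.1
        have harr : n + ((ys.count y : Int) + 1) = n + 1 + (ys.count y : Int) := by omega
        rw [harr]; exact this
      · intro v hv hlt
        have hne : ¬ (v = y) := by omega
        have hv' : v ∈ ys := by
          rcases List.mem_cons.mp hv with h | h
          · exact absurd h hne
          · exact h
        simp only [runLengthsGo]
        have hne' : ¬ (y = v) := fun h => hne h.symm
        have : ((y :: ys).count v : Int) = (ys.count v : Int) := by
          simp [hne']
        rw [this]
        exact ihh.2.2 v hv' hlt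
    · have hcy : cur < y := lt_of_le_of_ne (hle y (List.mem_cons_self)) (fun h => hy h.symm : ¬ cur = y)
      have ihh := ih y 1 hpw' hyle
      have hcur0 : ((y :: ys).count cur : Int) = 0 := by
        have h1 : cur ∉ y :: ys := by
          intro hmem
          rcases List.mem_cons.mp hmem with h | h
          · exact hy h.symm
          · exact absurd (hyle cur h) (by omega)
        simp [List.count_eq_zero_of_not_mem h1]
      refine ⟨?_, ?_, ?_⟩
      · intro m hm
        simp only [runLengthsGo, if_neg hy] at hm
        rcases List.mem_cons.mp hm with h | h
        · left; rw [hcur0]; omega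
        · rcases ihh.1 m h with h' | ⟨v, hv, hlt, he⟩
          · right
            refine ⟨y, List.mem_cons_self, hcy, ?_⟩
            simp only [List.count_cons, BEq.rfl, if_pos]
            push_cast; omega
          · right
            refine ⟨v, List.mem_cons_of_mem _ hv, lt_trans hcy hlt, ?_⟩
            have hyv' : ¬ (y = v) := by omega
            simp [hyv', he]
      · simp only [runLengthsGo, if_neg hy]
        rw [hcur0]
        simp
      · intro v hv hlt
        simp only [runLengthsGo, if_neg hy]
        rcases List.mem_cons.mp hv with h | h
        · subst h
          refine List.mem_cons_of_mem _ ?_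
          have := ihh.2.1
          have hc : ((v :: ys).count v : Int) = 1 + (ys.count v : Int) := by
            simp [List.count_cons_self]; omega
          rw [hc]; exact this
        · have hyv : y ≤ v := hyle v h
          by_cases hvy : v = y
          · subst hvy
            refine List.mem_cons_of_mem _ ?_
            have := ihh.2.1
            have hc : ((v :: ys).count v : Int) = 1 + (ys.count v : Int) := by
              simp [List.count_cons_self]; omega
            rw [hc]; exact this
          · have hylt : y < v := lt_of_le_of_ne hyv (fun h' => hvy h'.symm)
            refine List.mem_cons_of_mem _ ?_
            have hvy' : ¬ (y = v) := fun h' => hvy h'.symm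
            have hc : ((y :: ys).count v : Int) = (ys.count v : Int) := by
              simp [hvy']
            rw [hc]
            exact ihh.2.2 v h hylt

lemma runLengths_mem_iff (s : List Int) (hpw : s.Pairwise (· ≤ ·)) :
    (∀ m ∈ runLengths s, ∃ v ∈ s, m = (s.count v : Int))
    ∧ (∀ v ∈ s, ((s.count v : Int)) ∈ runLengths s) := by
  cases s with
  | nil => simp [runLengths]
  | cons x xs =>
    have hle : ∀ y ∈ xs, x ≤ y := fun z hz => List.rel_of_pairwise_cons hpw hz
    have h := runLengthsGo_spec xs x 1 hpw.of_cons hle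
    have hcx : (((x :: xs).count x : Int)) = 1 + (xs.count x : Int) := by
      simp [List.count_cons_self]; omega
    constructor
    · intro m hm
      rcases h.1 m hm with h' | ⟨v, hv, hlt, he⟩
      · exact ⟨x, List.mem_cons_self, by rw [hcx]; omega⟩
      · refine ⟨v, List.mem_cons_of_mem _ hv, ?_⟩
        have hxv : ¬ (x = v) := by omega
        simp [hxv, he]
    · intro v hv
      rcases List.mem_cons.mp hv with h' | h'
      · subst h'
        rw [hcx]; exact h.2.1
      · by_cases hvx : v = x
        · subst hvx
          rw [hcx]; exact h.2.1
        · have hlt : x < v := lt_of_le_of_ne (hle v h') (fun h'' => hvx h''.symm)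
          have hvx' : ¬ (x = v) := fun h'' => hvx h''.symm
          have hc : (((x :: xs).count v : Int)) = (xs.count v : Int) := by
            simp [hvx']
          rw [hc]; exact h.2.2 v h' hlt

-- ===== VERDICT (by name: the statement is the Claim_ definition above) =====
theorem verify_wr_spec : Claim_equal_verify_wr := by
  intro wrs _ hpre
  unfold Spec_verify_wr verify_wr verify_wr_alt
  simp only [PySem.List.foldl_append_eq_flatten]
  set check0 : List Int :=
    List.replicate ((PySem.List.pyGet? wrs 0).getD []).length 0 with hc0
  set cv : List Int := check0 ++ wrs.flatten with hcv
  -- combined vector is nonempty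
  have hne : cv ≠ [] := by
    rcases hpre with ⟨_, hany⟩
    rcases List.any_eq_true.mp hany with ⟨l, hl, hlne⟩
    have : l ≠ [] := by simpa using hlne
    rcases List.exists_mem_of_ne_nil l this with ⟨a, ha⟩
    have : a ∈ cv := by
      rw [hcv]
      exact List.mem_append_right _ (List.mem_flatten.mpr ⟨l, hl, ha⟩)
    intro h; rw [h] at this; exact absurd this (List.not_mem_nil)
  -- A side: head of the count-descending sort of Counter items
  have hitems := PySem.Dict.items_counter (xs := cv)
  have hitems_ne : (PySem.Dict.counter cv).items ≠ [] := by
    rcases List.exists_mem_of_ne_nil cv hne with ⟨a, ha⟩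
    have : a ∈ PySem.Set.ofList cv := (PySem.Set.mem_ofList _ _).mpr ha
    intro h
    rw [hitems] at h
    rcases List.map_eq_nil_iff.mp h with h'
    rw [h'] at this; exact absurd this (List.not_mem_nil)
  obtain ⟨p, tA, hA⟩ : ∃ p tA,
      PySem.List.sorted (PySem.Dict.counter cv).items (fun q => q.2) true = p :: tA := by
    cases hAs : PySem.List.sorted (PySem.Dict.counter cv).items (fun q => q.2) true with
    | nil => exact absurd ((PySem.List.sorted_eq_nil_iff _ _ _).mp hAs) hitems_ne
    | cons p t => exact ⟨p, t, rfl⟩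
  -- B side: head of the descending sort of the run lengths of sorted cv
  set s : List Int := PySem.List.sorted cv (fun x => x) false with hs
  have hperm : s.Perm cv := PySem.List.sorted_perm cv (fun x => x) false
  have hpw : s.Pairwise (· ≤ ·) := by
    have := PySem.List.sorted_pairwise cv (fun x => x)
    simpa using this
  have hsne : s ≠ [] := fun h => hne (List.Perm.eq_nil (h ▸ hperm).symm)
  have hrl := runLengths_mem_iff s hpw
  have hrl_ne : runLengths s ≠ [] := by
    rcases List.exists_mem_of_ne_nil s hsne with ⟨a, ha⟩
    have := hrl.2 a ha
    intro h; rw [h] at this; exact absurd this (List.not_mem_nil)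
  obtain ⟨M, tB, hB⟩ : ∃ M tB,
      PySem.List.sorted (runLengths s) (fun x => x) true = M :: tB := by
    cases hBs : PySem.List.sorted (runLengths s) (fun x => x) true with
    | nil => exact absurd ((PySem.List.sorted_eq_nil_iff _ _ _).mp hBs) hrl_ne
    | cons M t => exact ⟨M, t, rfl⟩
  rw [hA, hB]
  simp only [PySem.List.pyGet?_zero_cons]
  -- p.2 = M : each is the maximum of the same collection of multiplicities
  have hcount : ∀ v : Int, s.count v = cv.count v := fun v => hperm.count_eq v
  have hpmem : p ∈ (PySem.Dict.counter cv).items :=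
    (PySem.List.mem_sorted _ _ _ _).mp (hA ▸ List.mem_cons_self)
  have hpmax : ∀ y ∈ (PySem.Dict.counter cv).items, y.2 ≤ p.2 :=
    fun y hy => PySem.List.key_head_sorted_rev_ge _ _ hA y hy
  have hMmem : M ∈ runLengths s :=
    (PySem.List.mem_sorted _ _ _ _).mp (hB ▸ List.mem_cons_self)
  have hMmax : ∀ y ∈ runLengths s, y ≤ M :=
    fun y hy => PySem.List.key_head_sorted_rev_ge _ _ hB y hy
  have hpM : p.2 = M := by
    -- p.2 ≤ M : p.2 is the multiplicity of some value, hence a run length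
    have h1 : p.2 ≤ M := by
      rw [hitems] at hpmem
      rcases List.mem_map.mp hpmem with ⟨k, hk, hkp⟩
      have hkcv : k ∈ cv := (PySem.Set.mem_ofList _ _).mp hk
      have hks : k ∈ s := hperm.mem_iff.mpr hkcv
      have : ((s.count k : Int)) ∈ runLengths s := hrl.2 k hks
      have hp2 : p.2 = (cv.count k : Int) := by rw [← hkp]
      rw [hp2, ← hcount k]
      exact hMmax _ this
    -- M ≤ p.2 : M is the multiplicity of some value, hence a Counter item count
    have h2 : M ≤ p.2 := by
      rcases hrl.1 M hMmem with ⟨v, hv, hMv⟩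
      have hvcv : v ∈ cv := hperm.mem_iff.mp hv
      have : (v, (cv.count v : Int)) ∈ (PySem.Dict.counter cv).items := by
        rw [hitems]
        exact List.mem_map.mpr ⟨v, (PySem.Set.mem_ofList _ _).mpr hvcv, rfl⟩
      have := hpmax _ this
      rw [hMv, hcount v]
      exact this
    omega
  rw [hpM]
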